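-- pv_equiv track=rewrite | github.com/SantoRemedio/golfScript | strings.py | raw_string
-- ===== SOURCE A (Python) =====
-- def raw_string(texto):
--     #
--     # Recibe un string y escapa solo los \ y '
--     #
--     lista = []
--     escape = False
--     for letra in texto:
--         if not escape and letra == '\\':
--             escape = True
--         else:
--             if escape:
--                 escape = False
--                 if letra not in "'":
--                     lista.append('\\')
--             lista.append(letra)
--     return ''.join(lista)
-- ===== SOURCE B (Python) =====
-- def raw_string(texto):
--     out = []
--     i = 0
--     n = len(texto)
--     while i < n:
--         c = texto[i]
--         if c == '\\':
--             if i + 1 < n: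
--                 nxt = texto[i + 1]
--                 if nxt != "'":
--                     out.append('\\')
--                 out.append(nxt)
--                 i += 2
--             else:
--                 i += 1
--         else:
--             out.append(c)
--             i += 1
--     return ''.join(out)
-- ===== Notes on version B (the rewrite author's own statement) =====
-- stated objective: alternative
-- what changed: Replaces the carried boolean escape flag with an index/lookahead walk that consumes a backslash together with its following character in one step (two-character pattern matching instead of state carried between iterations).
import Mathlib
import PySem

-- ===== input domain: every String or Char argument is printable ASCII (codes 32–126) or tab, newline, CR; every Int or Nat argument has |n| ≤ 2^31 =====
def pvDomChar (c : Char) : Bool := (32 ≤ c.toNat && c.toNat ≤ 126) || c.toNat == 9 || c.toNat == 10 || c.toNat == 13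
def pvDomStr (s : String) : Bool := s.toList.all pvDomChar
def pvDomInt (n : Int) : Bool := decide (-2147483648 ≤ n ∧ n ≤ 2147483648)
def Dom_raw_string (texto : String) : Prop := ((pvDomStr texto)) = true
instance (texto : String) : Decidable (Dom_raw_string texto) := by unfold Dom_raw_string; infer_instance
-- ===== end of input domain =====

-- B replaces A's carried boolean escape flag by a lookahead walk that consumes a
-- backslash together with the following character in one step; same cost (alternative).

-- ===== PORT A =====
-- loop over the characters carrying (lista, escape), exactly as the Python for-loop
def rawStringAux : List Char → List Char → Bool → List Char
  | [], lista, _ => lista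
  | letra :: rest, lista, escape =>
    if !escape && letra == '\\' then
      rawStringAux rest lista true
    else
      rawStringAux rest
        (lista ++ (if escape && letra != '\'' then ['\\'] else []) ++ [letra]) false

def raw_string (texto : String) : String :=
  String.ofList (rawStringAux texto.toList [] false)

-- ===== PORT B =====
-- lookahead walk: a backslash consumes the next character too (Source B's while loop)
def rawStringAltAux : List Char → List Char
  | [] => []
  | [c] => if c == '\\' then [] else [c]
  | c :: nxt :: r =>
    if c == '\\' then (if nxt != '\'' then ['\\'] else []) ++ nxt :: rawStringAltAux r
    else c :: rawStringAltAux (nxt :: r)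

def raw_string_alt (texto : String) : String :=
  String.ofList (rawStringAltAux texto.toList)

-- ===== PRECONDITION & SPEC =====
def Spec_raw_string (texto : String) (out : String) : Prop := out = raw_string_alt texto
instance (texto : String) (out : String) : Decidable (Spec_raw_string texto out) := by unfold Spec_raw_string; infer_instance

-- ===== CLAIM (what is proved, stated in full; the proofs are below) =====
def Claim_equal_raw_string : Prop := ∀ (texto : String), Dom_raw_string texto → Spec_raw_string texto (raw_string texto)

-- ===== LEMMAS AND PROOFS =====
theorem rawStringAux_eq (l : List Char) :
    ∀ acc : List Char,
      rawStringAux l acc false = acc ++ rawStringAltAux l ∧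
      rawStringAux l acc true =
        acc ++ (match l with
                | [] => []
                | nxt :: r => (if nxt != '\'' then ['\\'] else []) ++ nxt :: rawStringAltAux r) := by
  induction l with
  | nil => intro acc; simp [rawStringAux, rawStringAltAux]
  | cons c rest ih =>
    intro acc
    refine ⟨?_, ?_⟩
    · by_cases h : c = '\\'
      · subst h
        have h1 : rawStringAux ('\\' :: rest) acc false = rawStringAux rest acc true := by
          simp [rawStringAux]
        rw [h1, (ih acc).2]
        cases rest <;> simp [rawStringAltAux]
      · have hc : (c == '\\') = false := by simpa using h
        have h1 : rawStringAux (c :: rest) acc false = rawStringAux rest (acc ++ [c]) false := by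
          simp [rawStringAux, hc]
        rw [h1, (ih (acc ++ [c])).1]
        cases rest <;> simp [rawStringAltAux, hc]
    · have h1 : rawStringAux (c :: rest) acc true =
          rawStringAux rest (acc ++ (if c != '\'' then ['\\'] else []) ++ [c]) false := by
        simp [rawStringAux]
      rw [h1, (ih (acc ++ (if c != '\'' then ['\\'] else []) ++ [c])).1]
      by_cases h : c = '\'' <;> simp [h, List.append_assoc]

theorem raw_string_spec : Claim_equal_raw_string := by
  intro texto _
  unfold Spec_raw_string raw_string raw_string_alt
  exact congrArg String.ofList (rawStringAux_eq texto.toList []).1
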